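-- pv_equiv track=rewrite | github.com/ramsyana/Math-Papers-with-Code | papers/iterated-sumsets/python/interated_sumsets.py | generate_alpha_sequences
-- ===== SOURCE A (Python) =====
-- from typing import List, Set
--
-- def generate_alpha_sequences(n: int, R: int) -> List[List[int]]:
--     # Using smaller values for gamma
--     def gamma(r: int) -> int:
--         return r + 1  # Simplified gamma function
--
--     result = []
--
--     for k in range(1, n + 1):
--         sequence = set()
--         for s in range(1, R + 1):
--             sequence.add(0)
--             sequence.add(k * gamma(s))  # Simplified calculation
--         result.append(sorted(list(sequence)))
--
--     return result
-- ===== SOURCE B (Python) =====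
-- def generate_alpha_sequences(n: int, R: int) -> list:
--     # Incremental scheme: the k-th row is k times the base pattern
--     # base = [0, 2, 3, ..., R+1], so each row is obtained from the previous
--     # one by elementwise addition of the base -- no set, no sort, no products.
--     if n < 1:
--         return []
--     base = [0] + list(range(2, R + 2)) if R >= 1 else []
--     result = []
--     row = [0] * len(base)
--     for _ in range(n):
--         row = [a + b for a, b in zip(row, base)]
--         result.append(row)
--     return result
-- ===== Notes on version B (the rewrite author's own statement) =====
-- stated objective: alternative
-- what changed: B computes the base pattern [0,2,...,R+1] once and derives each successive row from the previous one by elementwise vector addition (running-sum dynamic programming), instead of A's per-k set insertion followed by sorting; no set, no sort and no multiplication per row.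
import Mathlib
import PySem

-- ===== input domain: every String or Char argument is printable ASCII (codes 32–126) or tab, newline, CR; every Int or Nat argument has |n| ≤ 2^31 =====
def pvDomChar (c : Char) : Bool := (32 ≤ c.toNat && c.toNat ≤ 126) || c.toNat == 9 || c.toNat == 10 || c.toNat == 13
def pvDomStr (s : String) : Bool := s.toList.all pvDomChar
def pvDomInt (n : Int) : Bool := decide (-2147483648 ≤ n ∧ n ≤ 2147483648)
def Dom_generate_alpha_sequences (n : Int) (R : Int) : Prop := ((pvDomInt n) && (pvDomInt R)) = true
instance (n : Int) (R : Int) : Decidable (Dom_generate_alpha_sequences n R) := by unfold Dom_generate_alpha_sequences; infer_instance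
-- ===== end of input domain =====

-- B builds the base pattern [0,2,…,R+1] once and derives each row from the previous one by
-- elementwise addition (running sums); A inserts into a set and sorts per k.

-- ===== PORT A =====
def generate_alpha_sequences (n : Int) (R : Int) : List (List Int) :=
  (PySem.List.pyRange 1 (n + 1) 1).foldl
    (fun result k =>
      let sequence : PySem.Set Int :=
        (PySem.List.pyRange 1 (R + 1) 1).foldl
          (fun seq s => PySem.Set.add (PySem.Set.add seq 0) (k * (s + 1)))
          PySem.Set.empty
      result ++ [PySem.List.sorted sequence (fun x => x) false])
    []

-- ===== PORT B =====
def generate_alpha_sequences_alt (n : Int) (R : Int) : List (List Int) :=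
  if n < 1 then [] else
  let base : List Int := if R ≥ 1 then 0 :: PySem.List.pyRange 2 (R + 2) 1 else []
  ((PySem.List.pyRange 0 n 1).foldl
    (fun (st : List (List Int) × List Int) _ =>
      let row := List.zipWith (fun a b => a + b) st.2 base
      (st.1 ++ [row], row))
    ([], List.replicate base.length (0 : Int))).1

-- ===== PRECONDITION & SPEC =====
def Spec_generate_alpha_sequences (n : Int) (R : Int) (out : List (List Int)) : Prop := out = generate_alpha_sequences_alt n R
instance (n : Int) (R : Int) (out : List (List Int)) : Decidable (Spec_generate_alpha_sequences n R out) := by unfold Spec_generate_alpha_sequences; infer_instance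

-- ===== CLAIM =====
def Claim_equal_generate_alpha_sequences : Prop := ∀ (n : Int) (R : Int), Dom_generate_alpha_sequences n R → Spec_generate_alpha_sequences n R (generate_alpha_sequences n R)

-- ===== LEMMAS AND PROOFS =====

-- membership in A's inner fold
theorem mem_inner_fold (k : Int) (l : List Int) (s0 : List Int) (y : Int) :
    y ∈ l.foldl (fun seq s => PySem.Set.add (PySem.Set.add seq 0) (k * (s + 1))) s0 ↔
      y ∈ s0 ∨ (l ≠ [] ∧ y = 0) ∨ ∃ s ∈ l, y = k * (s + 1) := by
  induction l generalizing s0 with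
  | nil => simp
  | cons a t ih =>
    simp only [List.foldl_cons, ih, PySem.Set.mem_add, List.mem_cons]
    constructor
    · rintro (((h | h) | h) | (⟨_, h⟩ | ⟨s, hs, h⟩))
      · exact Or.inl h
      · exact Or.inr (Or.inl ⟨by simp, h⟩)
      · exact Or.inr (Or.inr ⟨a, Or.inl rfl, h⟩)
      · exact Or.inr (Or.inl ⟨by simp, h⟩)
      · exact Or.inr (Or.inr ⟨s, Or.inr hs, h⟩)
    · rintro (h | (⟨_, h⟩ | ⟨s, (rfl | hs), h⟩))
      · exact Or.inl (Or.inl (Or.inl h))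
      · exact Or.inl (Or.inl (Or.inr h))
      · exact Or.inl (Or.inr h)
      · exact Or.inr (Or.inr ⟨s, hs, h⟩)

theorem nodup_inner_fold (k : Int) (l : List Int) (s0 : List Int) (h0 : s0.Nodup) :
    (l.foldl (fun seq s => PySem.Set.add (PySem.Set.add seq 0) (k * (s + 1))) s0).Nodup := by
  induction l generalizing s0 with
  | nil => exact h0
  | cons a t ih =>
    exact ih _ (PySem.Set.nodup_add _ _ (PySem.Set.nodup_add _ _ h0))

-- B's row shape is strictly increasing when 1 ≤ k
theorem row_pairwise (k : Int) (R : Int) (hk : 1 ≤ k) :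
    (0 :: (PySem.List.pyRange 2 (R + 2) 1).map (fun s => k * s)).Pairwise (· < ·) := by
  rw [List.pairwise_cons]
  constructor
  · intro x hx
    rcases List.mem_map.mp hx with ⟨s, hs, rfl⟩
    rw [PySem.List.mem_pyRange_one] at hs
    nlinarith [hs.1]
  · refine List.Pairwise.map _ ?_ (PySem.List.pairwise_lt_pyRange_one 2 (R + 2))
    intro a b hab
    nlinarith

-- the per-k row of A is the sorted progression 0, 2k, …, (R+1)k (for 1 ≤ k, 1 ≤ R)
theorem row_eq (k : Int) (R : Int) (hk : 1 ≤ k) (hR : 1 ≤ R) :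
    PySem.List.sorted
      ((PySem.List.pyRange 1 (R + 1) 1).foldl
        (fun seq s => PySem.Set.add (PySem.Set.add seq 0) (k * (s + 1))) PySem.Set.empty)
      (fun x => x) false
      = 0 :: (PySem.List.pyRange 2 (R + 2) 1).map (fun s => k * s) := by
  apply PySem.List.sorted_eq_of_perm_of_pairwise_lt
  · rw [List.perm_ext_iff_of_nodup]
    · intro y
      rw [mem_inner_fold]
      have hne : PySem.List.pyRange 1 (R + 1) 1 ≠ [] := by
        intro h
        have := PySem.List.length_pyRange_one 1 (R + 1)
        rw [h] at this
        simp at this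
        omega
      constructor
      · intro h
        rcases List.mem_cons.mp h with rfl | h
        · exact Or.inr (Or.inl ⟨hne, rfl⟩)
        · rcases List.mem_map.mp h with ⟨s, hs, rfl⟩
          rw [PySem.List.mem_pyRange_one] at hs
          exact Or.inr (Or.inr ⟨s - 1, PySem.List.mem_pyRange_one.mpr (by omega), by ring⟩)
      · rintro (h | ⟨_, rfl⟩ | ⟨s, hs, rfl⟩)
        · simp [PySem.Set.empty] at h
        · exact List.mem_cons_self
        · rw [PySem.List.mem_pyRange_one] at hs
          exact List.mem_cons_of_mem _ (List.mem_map.mpr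
            ⟨s + 1, PySem.List.mem_pyRange_one.mpr (by omega), rfl⟩)
    · exact (row_pairwise k R hk).nodup
    · exact nodup_inner_fold k _ _ List.nodup_nil
  · exact row_pairwise k R hk

-- per-k row of A when R < 1: the inner range is empty
theorem row_eq_nil (k : Int) (R : Int) (hR : R < 1) :
    PySem.List.sorted
      ((PySem.List.pyRange 1 (R + 1) 1).foldl
        (fun seq s => PySem.Set.add (PySem.Set.add seq 0) (k * (s + 1))) PySem.Set.empty)
      (fun x => x) false
      = [] := by
  rw [PySem.List.pyRange_one_eq_nil (by omega)]
  rfl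

-- adding the base to k·base gives (k+1)·base
theorem zipWith_add_map (base : List Int) (k : Int) :
    List.zipWith (fun a b => a + b) (base.map (fun v => k * v)) base
      = base.map (fun v => (k + 1) * v) := by
  induction base with
  | nil => rfl
  | cons a t ih => simp [ih]; ring

-- B's fold unrolled: starting from row k·base, j further steps emit rows (k+1)·base … (k+j)·base
theorem foldB (base : List Int) (l : List Int) (res : List (List Int)) (k : Int) :
    l.foldl
      (fun (st : List (List Int) × List Int) _ =>
        let row := List.zipWith (fun a b => a + b) st.2 base
        (st.1 ++ [row], row))
      (res, base.map (fun v => k * v))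
    = (res ++ (PySem.List.pyRange (k + 1) (k + (l.length : Int) + 1) 1).map
          (fun j => base.map (fun v => j * v)),
       base.map (fun v => (k + (l.length : Int)) * v)) := by
  induction l generalizing res k with
  | nil =>
    simp
  | cons a t ih =>
    simp only [List.foldl_cons, zipWith_add_map]
    rw [ih]
    have h1 : k + (((a :: t).length : Int)) + 1 = (k + 1) + (t.length : Int) + 1 := by
      simp [List.length_cons]; ring
    have h2 : k + (((a :: t).length : Int)) = (k + 1) + (t.length : Int) := by
      simp [List.length_cons]; ring
    rw [h1, h2, PySem.List.pyRange_one_cons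
      (by omega : k + 1 < (k + 1) + (t.length : Int) + 1)]
    simp [List.append_assoc]

-- k·base equals A's per-k row
theorem base_map_eq_row (k : Int) (R : Int) (hk : 1 ≤ k) :
    (if R ≥ 1 then 0 :: PySem.List.pyRange 2 (R + 2) 1 else ([] : List Int)).map
        (fun v => k * v)
      = PySem.List.sorted
          ((PySem.List.pyRange 1 (R + 1) 1).foldl
            (fun seq s => PySem.Set.add (PySem.Set.add seq 0) (k * (s + 1))) PySem.Set.empty)
          (fun x => x) false := by
  by_cases hR : R ≥ 1
  · rw [if_pos hR, row_eq k R hk hR]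
    simp
  · rw [if_neg hR, row_eq_nil k R (by omega)]
    rfl

-- ===== VERDICT =====
theorem generate_alpha_sequences_spec : Claim_equal_generate_alpha_sequences := by
  intro n R _
  unfold Spec_generate_alpha_sequences generate_alpha_sequences generate_alpha_sequences_alt
  rw [PySem.List.foldl_append_singleton_eq_map, List.nil_append]
  by_cases hn0 : n < 1
  · rw [if_pos hn0, PySem.List.pyRange_one_eq_nil (by omega : n + 1 ≤ 1)]
    rfl
  rw [if_neg hn0]
  show _ = ((PySem.List.pyRange 0 n 1).foldl
      (fun (st : List (List Int) × List Int) _ =>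
        let row := List.zipWith (fun a b => a + b) st.2
          (if R ≥ 1 then 0 :: PySem.List.pyRange 2 (R + 2) 1 else [])
        (st.1 ++ [row], row))
      ([], List.replicate
        (if R ≥ 1 then 0 :: PySem.List.pyRange 2 (R + 2) 1 else ([] : List Int)).length
        (0 : Int))).1
  rw [show List.replicate
        (if R ≥ 1 then 0 :: PySem.List.pyRange 2 (R + 2) 1 else ([] : List Int)).length
        (0 : Int)
      = (if R ≥ 1 then 0 :: PySem.List.pyRange 2 (R + 2) 1 else ([] : List Int)).map
          (fun v => (0 : Int) * v) from by simp]
  rw [foldB]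
  simp only [List.nil_append, zero_add]
  rw [show ((PySem.List.pyRange 0 n 1).length : Int) = n from by
    rw [PySem.List.length_pyRange_one]; omega]
  apply List.map_congr_left
  intro k hk
  rw [PySem.List.mem_pyRange_one] at hk
  exact (base_map_eq_row k R hk.1).symm
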